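-- pv_equiv track=rewrite | github.com/rogerboy38/app_migrator | app_migrator/commands/fix_orphan_doctypes.py | find_matching_module
-- ===== SOURCE A (Python) =====
-- from typing import Dict, List, Tuple, Optional
--
-- def find_matching_module(doctype_name: str, available_modules: List[str]) -> Optional[str]:
--     """Find best matching module for a doctype based on naming patterns"""
--     if not available_modules:
--         return None
--
--     doctype_lower = doctype_name.lower()
--
--     # Try exact match first
--     for module in available_modules:
--         if module.lower() == doctype_lower:
--             return module
--
--     # Try partial matches
--     for module in available_modules:
--         module_lower = module.lower()
--
--         # Check if doctype contains module name or vice versa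
--         if module_lower in doctype_lower or doctype_lower in module_lower:
--             return module
--
--         # Check for common patterns
--         module_no_space = module_lower.replace(' ', '')
--         doctype_no_space = doctype_lower.replace(' ', '')
--
--         if module_no_space in doctype_no_space or doctype_no_space in module_no_space:
--             return module
--
--     return None
-- ===== SOURCE B (Python) =====
-- from typing import List, Optional
--
-- def find_matching_module(doctype_name: str, available_modules: List[str]) -> Optional[str]:
--     """Single pass: return the first exact (case-insensitive) match immediately;
--     remember the first partial match and return it if no exact match exists."""
--     doctype_lower = doctype_name.lower()
--     partial = None
--     for module in available_modules:
--         module_lower = module.lower()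
--         if module_lower == doctype_lower:
--             return module
--         if partial is None:
--             m = module_lower.replace(' ', '')
--             d = doctype_lower.replace(' ', '')
--             if (module_lower in doctype_lower or doctype_lower in module_lower
--                     or m in d or d in m):
--                 partial = module
--     return partial
-- ===== Notes on version B (the rewrite author's own statement) =====
-- stated objective: simpler
-- what changed: Two sequential scans (exact pass, then partial pass) are fused into one loop that returns on an exact match and remembers the first partial match in a single variable.
import Mathlib
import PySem

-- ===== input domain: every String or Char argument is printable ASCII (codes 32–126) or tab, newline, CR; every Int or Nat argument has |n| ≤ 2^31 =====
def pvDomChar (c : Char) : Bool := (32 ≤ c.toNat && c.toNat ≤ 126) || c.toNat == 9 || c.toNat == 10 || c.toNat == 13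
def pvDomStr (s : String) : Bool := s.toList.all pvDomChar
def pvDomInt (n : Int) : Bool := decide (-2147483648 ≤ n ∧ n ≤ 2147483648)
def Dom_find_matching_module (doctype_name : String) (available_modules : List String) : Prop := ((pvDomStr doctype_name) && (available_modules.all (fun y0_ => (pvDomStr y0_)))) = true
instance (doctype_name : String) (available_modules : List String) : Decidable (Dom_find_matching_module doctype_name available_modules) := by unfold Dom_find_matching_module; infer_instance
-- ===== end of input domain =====

-- B fuses A's two scans (exact pass, then partial pass) into one loop that returns on an
-- exact match and remembers the first partial match; objective: simpler (one pass).

-- ===== PORT A =====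
-- Literal transliteration: empty guard, exact-match scan, then partial-match scan.
def find_matching_module (doctype_name : String) (available_modules : List String) : Option String :=
  if available_modules = [] then none
  else
    let doctype_lower := PySem.Str.lower doctype_name
    match available_modules.find? (fun module => PySem.Str.lower module == doctype_lower) with
    | some module => some module
    | none =>
      available_modules.find? (fun module =>
        let module_lower := PySem.Str.lower module
        if PySem.Str.isIn module_lower doctype_lower || PySem.Str.isIn doctype_lower module_lower then
          true
        else
          let module_no_space := PySem.Str.replace module_lower " " ""
          let doctype_no_space := PySem.Str.replace doctype_lower " " ""
          PySem.Str.isIn module_no_space doctype_no_space || PySem.Str.isIn doctype_no_space module_no_space)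

-- ===== PORT B =====
-- One pass over the list, carrying the first partial match in `partialM`.
def fmmGo (doctype_lower : String) (partialM : Option String) : List String → Option String
  | [] => partialM
  | module :: rest =>
    let module_lower := PySem.Str.lower module
    if module_lower == doctype_lower then some module
    else if partialM.isNone &&
        (PySem.Str.isIn module_lower doctype_lower || PySem.Str.isIn doctype_lower module_lower ||
         PySem.Str.isIn (PySem.Str.replace module_lower " " "") (PySem.Str.replace doctype_lower " " "") ||
         PySem.Str.isIn (PySem.Str.replace doctype_lower " " "") (PySem.Str.replace module_lower " " "")) then
      fmmGo doctype_lower (some module) rest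
    else
      fmmGo doctype_lower partialM rest

def find_matching_module_alt (doctype_name : String) (available_modules : List String) : Option String :=
  fmmGo (PySem.Str.lower doctype_name) none available_modules

-- ===== PRECONDITION & SPEC =====
def Spec_find_matching_module (doctype_name : String) (available_modules : List String) (out : Option String) : Prop := out = find_matching_module_alt doctype_name available_modules
instance (doctype_name : String) (available_modules : List String) (out : Option String) : Decidable (Spec_find_matching_module doctype_name available_modules out) := by unfold Spec_find_matching_module; infer_instance

-- ===== CLAIM (what is proved, stated in full; the proofs are below) =====
def Claim_equal_find_matching_module : Prop := ∀ (doctype_name : String) (available_modules : List String), Dom_find_matching_module doctype_name available_modules → Spec_find_matching_module doctype_name available_modules (find_matching_module doctype_name available_modules)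

-- ===== LEMMAS AND PROOFS =====

-- A's partial-match predicate (the lambda of A's second scan), named for the proof.
def fmmPartA (dl : String) (m : String) : Bool :=
  let module_lower := PySem.Str.lower m
  if PySem.Str.isIn module_lower dl || PySem.Str.isIn dl module_lower then true
  else
    PySem.Str.isIn (PySem.Str.replace module_lower " " "") (PySem.Str.replace dl " " "") ||
    PySem.Str.isIn (PySem.Str.replace dl " " "") (PySem.Str.replace module_lower " " "")

lemma pv_if_or_true (a b c : Bool) : (if (a || b) = true then true else c) = ((a || b) || c) := by
  cases a <;> cases b <;> simp

-- B's flat disjunction in fmmGo agrees with A's staged partial test.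
lemma fmmPartA_iff (dl m : String) :
    (PySem.Str.isIn (PySem.Str.lower m) dl || PySem.Str.isIn dl (PySem.Str.lower m) ||
     PySem.Str.isIn (PySem.Str.replace (PySem.Str.lower m) " " "") (PySem.Str.replace dl " " "") ||
     PySem.Str.isIn (PySem.Str.replace dl " " "") (PySem.Str.replace (PySem.Str.lower m) " " "")) = fmmPartA dl m := by
  unfold fmmPartA
  rw [pv_if_or_true, Bool.or_assoc]

-- fmmGo returns the first exact match if any, else the carried partial, else the first partial match.
lemma fmmGo_spec (dl : String) (xs : List String) (p : Option String) :
    fmmGo dl p xs = (xs.find? (fun m => PySem.Str.lower m == dl)).or (p.or (xs.find? (fmmPartA dl))) := by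
  induction xs generalizing p with
  | nil => cases p <;> simp [fmmGo]
  | cons m rest ih =>
    rw [fmmGo]
    by_cases h1 : (PySem.Str.lower m == dl) = true
    · simp [h1, List.find?]
    · have h1' : (PySem.Str.lower m == dl) = false := by simpa using h1
      rw [List.find?]
      simp only [h1', if_false, Bool.false_eq_true]
      cases p with
      | some q =>
        simp only [Option.isNone_some, Bool.false_and, if_neg (by simp : ¬ (false = true))]
        rw [ih]
        rfl
      | none =>
        simp only [Option.isNone_none, Bool.true_and]
        rw [fmmPartA_iff]
        by_cases h2 : fmmPartA dl m = true
        · rw [if_pos h2, ih, List.find?, h2]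
          cases rest.find? (fun m => PySem.Str.lower m == dl) <;> rfl
        · have h2' : fmmPartA dl m = false := by simpa using h2
          rw [h2', if_neg (by simp), ih, List.find?, h2']

-- ===== VERDICT (by name: the statement is the Claim_ definition above) =====
theorem find_matching_module_spec : Claim_equal_find_matching_module := by
  intro d xs _
  unfold Spec_find_matching_module find_matching_module find_matching_module_alt
  rw [fmmGo_spec]
  cases xs with
  | nil => simp
  | cons m rest =>
    rw [if_neg (by simp : ¬ (m :: rest = []))]
    show (match (m :: rest).find? (fun module => PySem.Str.lower module == PySem.Str.lower d) with
          | some module => some module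
          | none => (m :: rest).find? (fmmPartA (PySem.Str.lower d))) = _
    cases (m :: rest).find? (fun module => PySem.Str.lower module == PySem.Str.lower d) <;> rfl
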